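-- pv_equiv track=rewrite | github.com/yz4004/codeforce-python | copypaste/字典序贪心.py | smallest_alphabetic_subsequence
-- ===== SOURCE A (Python) =====
-- def smallest_alphabetic_subsequence(s, k):
--
--     # 从前往后贪心
--     # 前k个先保留 然后枚举到的新字符串 尝试从后往前替换
--     n = len(s)
--     def is_tail_enough(i, st):
--         # st [i,n)
--         # 当引入i发现比栈尾更小时 如果drop掉栈尾元素 包括i在内的后缀 [i,n) 足够构成k长吗？
--         return len(st)-1 + (n-i) >= k
--
--         # drop = n - k 也可以用allowed drop思考 最多drop n-k次
--
--     st = []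
--     for i,c in enumerate(s):
--         while st and (st[-1] > c and is_tail_enough(i, st)):
--             st.pop()
--         st.append(c)
--
--     if len(st) < k:
--         return None
--     return "".join(st[:k])
-- ===== SOURCE B (Python) =====
-- def smallest_alphabetic_subsequence(s, k):
--     # Greedy window selection: for each of the k output positions, pick the
--     # leftmost minimum of the window that still leaves enough characters.
--     n = len(s)
--     if k > n:
--         return None
--     res = []
--     start = 0
--     for i in range(k):
--         window = s[start:n - (k - 1 - i)]
--         c = min(window)
--         res.append(c)
--         start += window.index(c) + 1
--     return "".join(res)
-- ===== Notes on version B (the rewrite author's own statement) =====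
-- stated objective: alternative
-- what changed: Replaces the monotonic-stack pop/push greedy with a forward window-selection greedy: for each of the k output positions it takes the leftmost minimum of the still-feasible window and advances a start pointer past it.
-- outside the precondition, e.g. on smallest_alphabetic_subsequence('ab', -1): A returns 'a', B returns ''
import Mathlib
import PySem

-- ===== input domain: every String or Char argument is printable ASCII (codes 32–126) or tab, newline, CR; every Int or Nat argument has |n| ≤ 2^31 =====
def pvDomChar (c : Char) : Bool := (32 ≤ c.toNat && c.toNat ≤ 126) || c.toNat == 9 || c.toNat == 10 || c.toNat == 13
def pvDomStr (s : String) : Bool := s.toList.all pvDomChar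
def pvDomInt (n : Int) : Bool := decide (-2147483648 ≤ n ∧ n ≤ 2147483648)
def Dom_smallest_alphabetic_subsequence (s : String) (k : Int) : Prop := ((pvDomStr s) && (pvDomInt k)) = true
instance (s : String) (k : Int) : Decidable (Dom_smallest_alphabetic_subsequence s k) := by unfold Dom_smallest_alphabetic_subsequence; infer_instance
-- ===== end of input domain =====

-- B replaces A's monotonic-stack greedy by a forward window-selection greedy (alternative algorithm, not faster; equal on Pre_).

-- ===== PORT A =====
-- the inner `while st and (st[-1] > c and len(st)-1+(n-i) >= k): st.pop()`;
-- the stack is kept top-first (Python's append/pop at the end = cons/uncons at the head),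
-- and m carries the value n - i (it starts at n and decreases by 1 per consumed character).
def popA (k m : Int) (c : Char) : List Char → List Char
  | [] => []
  | t :: r => if c < t ∧ ((t :: r).length : Int) - 1 + m ≥ k then popA k m c r else t :: r

-- the `for i, c in enumerate(s)` loop over the remaining characters
def runA (k : Int) : Int → List Char → List Char → List Char
  | _, st, [] => st
  | m, st, c :: t => runA k (m - 1) (c :: popA k m c st) t

def smallest_alphabetic_subsequence (s : String) (k : Int) : Option String :=
  let l := s.toList
  let n : Int := l.length
  let st := (runA k n [] l).reverse      -- back to Python's bottom-first order
  if (st.length : Int) < k then none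
  else some (String.mk (PySem.List.slice st none (some k)))   -- "".join(st[:k])

-- ===== PORT B =====
-- `c = min(window); j = window.index(c)` : Python's min returns the leftmost minimum,
-- so one scan returning (leftmost minimum, its index) is exact.
def minWith : List Char → Option (Char × Nat)
  | [] => none
  | c :: t =>
    match minWith t with
    | none => some (c, 0)
    | some (m, j) => if c ≤ m then some (c, 0) else some (m, j + 1)

-- the `for i in range(k)` loop; r = k - i is the number of picks still to make,
-- window = s[start : n-(r-1)] rendered as (drop start).take (stop - start) (Nat sub clamps like a slice)
def bLoop (cl : List Char) (n : Nat) : Nat → Nat → List Char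
  | 0, _ => []
  | r + 1, start =>
    match minWith ((cl.drop start).take (n - r - start)) with
    | none => []   -- unreachable under Pre_ (Python's min would raise on an empty window)
    | some (m, j) => m :: bLoop cl n r (start + j + 1)

def smallest_alphabetic_subsequence_alt (s : String) (k : Int) : Option String :=
  let l := s.toList
  let n := l.length
  if (n : Int) < k then none
  else some (String.mk (bLoop l n k.toNat 0))   -- range(k) is empty for k ≤ 0

-- ===== PRECONDITION & SPEC =====
-- Pre_ admits the natural domain k ≥ 0, and also k ≤ -len(s) (there both programs return "").
-- It excludes only -len(s) < k < 0: a negative requested length is outside the function's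
-- purpose and no behaviour is specified there, so each program's reading is as defensible as
-- the other (A returns its stack minus the last |k| characters, B selects nothing and returns "").
def Pre_smallest_alphabetic_subsequence (s : String) (k : Int) : Prop := 0 ≤ k ∨ (s.toList.length : Int) ≤ -k
instance (s : String) (k : Int) : Decidable (Pre_smallest_alphabetic_subsequence s k) := by unfold Pre_smallest_alphabetic_subsequence; infer_instance
def pvWitness_smallest_alphabetic_subsequence : String × Int := ("bcabca", 3)

def Spec_smallest_alphabetic_subsequence (s : String) (k : Int) (out : Option String) : Prop := out = smallest_alphabetic_subsequence_alt s k
instance (s : String) (k : Int) (out : Option String) : Decidable (Spec_smallest_alphabetic_subsequence s k out) := by unfold Spec_smallest_alphabetic_subsequence; infer_instance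

-- ===== CLAIM (what is proved, stated in full; the proofs are below) =====
def Claim_equal_smallest_alphabetic_subsequence : Prop := ∀ (s : String) (k : Int), Dom_smallest_alphabetic_subsequence s k → Pre_smallest_alphabetic_subsequence s k → Spec_smallest_alphabetic_subsequence s k (smallest_alphabetic_subsequence s k)

-- ===== LEMMAS AND PROOFS =====

-- B's loop, rephrased recursively on the dropped suffix (proof device only)
def subB : List Char → Nat → List Char
  | _, 0 => []
  | l, r + 1 =>
    match minWith (l.take (l.length - r)) with
    | none => []
    | some (m, j) => m :: subB (l.drop (j + 1)) r

lemma popA_sub (k m : Int) (c : Char) : ∀ (st : List Char), ∀ x ∈ popA k m c st, x ∈ st := by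
  intro st
  induction st with
  | nil => intro x hx; simpa [popA] using hx
  | cons t r ih =>
    intro x hx
    simp only [popA] at hx
    split at hx
    · exact List.mem_cons_of_mem _ (ih x hx)
    · exact hx


lemma runA_sub (k : Int) : ∀ (t : List Char) (m : Int) (st : List Char),
    ∀ x ∈ runA k m st t, x ∈ st ∨ x ∈ t := by
  intro t
  induction t with
  | nil => intro m st x hx; exact Or.inl (by simpa [runA] using hx)
  | cons c t ih =>
    intro m st x hx
    simp only [runA] at hx
    rcases ih _ _ x hx with h | h
    · rcases List.mem_cons.mp h with h | h
      · exact Or.inr (by simp [h])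
      · exact Or.inl (popA_sub _ _ _ _ x h)
    · exact Or.inr (List.mem_cons_of_mem _ h)


lemma popA_len (k m : Int) (c : Char) : ∀ (st : List Char),
    (st.length : Int) + m ≥ k → ((popA k m c st).length : Int) + m ≥ k := by
  intro st
  induction st with
  | nil => intro h; simpa [popA] using h
  | cons t r ih =>
    intro h
    simp only [popA]
    split
    · rename_i hc
      exact ih (by simp at hc ⊢; omega)
    · exact h


lemma popA_le (k m : Int) (c : Char) : ∀ (st : List Char), (popA k m c st).length ≤ st.length := by
  intro st
  induction st with
  | nil => simp [popA]
  | cons t r ih =>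
    simp only [popA]
    split
    · exact le_trans ih (by simp)
    · exact le_refl _


lemma runA_len_ge (k : Int) : ∀ (t : List Char) (m : Int) (st : List Char),
    (st.length : Int) + m ≥ k → ((runA k m st t).length : Int) + (m - t.length) ≥ k := by
  intro t
  induction t with
  | nil => intro m st h; simp only [runA, List.length_nil]; push_cast; omega
  | cons c t ih =>
    intro m st h
    simp only [runA]
    have h1 : ((popA k m c st).length : Int) + m ≥ k := popA_len k m c st h
    have h2 := ih (m - 1) (c :: popA k m c st) (by simp; push_cast at h1 ⊢; omega)
    simp only [List.length_cons] at h2 ⊢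
    push_cast at h2 ⊢
    omega


lemma runA_len_le (k : Int) : ∀ (t : List Char) (m : Int) (st : List Char),
    (runA k m st t).length ≤ st.length + t.length := by
  intro t
  induction t with
  | nil => intro m st; simp [runA]
  | cons c t ih =>
    intro m st
    simp only [runA, List.length_cons]
    have h1 := popA_le k m c st
    have h2 := ih (m - 1) (c :: popA k m c st)
    simp only [List.length_cons] at h2
    omega


lemma runA_append (k : Int) : ∀ (u v : List Char) (m : Int) (st : List Char),
    runA k m st (u ++ v) = runA k (m - u.length) (runA k m st u) v := by
  intro u
  induction u with
  | nil => intro v m st; simp [runA]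
  | cons c u ih =>
    intro v m st
    simp only [List.cons_append, runA, List.length_cons]
    rw [ih]
    congr 1
    push_cast
    ring


lemma popA_all (k m : Int) (c : Char) : ∀ (st : List Char),
    (∀ x ∈ st, c < x) → k ≤ m → popA k m c st = [] := by
  intro st
  induction st with
  | nil => intro _ _; simp [popA]
  | cons t r ih =>
    intro hall hm
    simp only [popA]
    rw [if_pos]
    · exact ih (fun x hx => hall x (List.mem_cons_of_mem _ hx)) hm
    · refine ⟨hall t (by simp), ?_⟩
      simp only [List.length_cons]
      push_cast
      omega


lemma popA_pin (k m : Int) (c b : Char) (hb : k ≤ m → b ≤ c) : ∀ (st : List Char),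
    popA k m c (st ++ [b]) = popA (k - 1) m c st ++ [b] := by
  intro st
  induction st with
  | nil =>
    simp only [List.nil_append, popA]
    rw [if_neg]
    simp only [List.length_cons, List.length_nil]
    push_cast
    rintro ⟨hcb, hkm⟩
    have := hb (by omega)
    exact absurd hcb (not_lt.mpr this)
  | cons t r ih =>
    show popA k m c (t :: (r ++ [b])) = _
    simp only [popA]
    have hcond : (c < t ∧ ((t :: (r ++ [b])).length : Int) - 1 + m ≥ k) ↔
        (c < t ∧ ((t :: r).length : Int) - 1 + m ≥ k - 1) := by
      apply and_congr_right
      intro _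
      simp only [List.length_cons, List.length_append, List.length_nil]
      push_cast
      omega
    simp only [hcond]
    split
    · exact ih
    · simp

lemma runA_pin (k : Int) (b : Char) : ∀ (t : List Char) (m : Int) (st : List Char),
    (∀ x ∈ t.take (m - k + 1).toNat, b ≤ x) →
    runA k m (st ++ [b]) t = runA (k - 1) m st t ++ [b] := by
  intro t
  induction t with
  | nil => intro m st _; simp [runA]
  | cons c t ih =>
    intro m st H
    have hb : k ≤ m → b ≤ c := by
      intro hk
      apply H
      obtain ⟨q, hq⟩ : ∃ q, (m - k + 1).toNat = q + 1 := ⟨(m - k).toNat, by omega⟩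
      rw [hq, List.take_succ_cons]
      simp
    simp only [runA]
    rw [popA_pin k m c b hb]
    have hc : c :: (popA (k - 1) m c st ++ [b]) = (c :: popA (k - 1) m c st) ++ [b] := by simp
    rw [hc, ih (m - 1) _ ?_]
    intro x hx
    apply H
    by_cases hmk : k ≤ m
    · have h1 : (m - 1 - k + 1).toNat + 1 = (m - k + 1).toNat := by omega
      rw [← h1, List.take_succ_cons]
      exact List.mem_cons_of_mem _ hx
    · have h0 : (m - 1 - k + 1).toNat = 0 := by omega
      rw [h0] at hx
      simp at hx


lemma minWith_ex : ∀ (c : Char) (t : List Char), ∃ p, minWith (c :: t) = some p := by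
  intro c t
  simp only [minWith]
  cases minWith t with
  | none => exact ⟨_, rfl⟩
  | some p =>
    obtain ⟨m, j⟩ := p
    dsimp only
    by_cases h : c ≤ m
    · exact ⟨_, by rw [if_pos h]⟩
    · exact ⟨_, by rw [if_neg h]⟩

lemma minWith_spec : ∀ (w : List Char) (c : Char) (j : Nat), minWith w = some (c, j) →
    j < w.length ∧ w[j]? = some c ∧ (∀ x ∈ w.take j, c < x) ∧ (∀ x ∈ w, c ≤ x) := by
  intro w
  induction w with
  | nil => intro c j h; simp [minWith] at h
  | cons a t ih =>
    intro c j h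
    simp only [minWith] at h
    cases hmt : minWith t with
    | none =>
      rw [hmt] at h
      dsimp only at h
      have ht : t = [] := by
        cases t with
        | nil => rfl
        | cons b u => obtain ⟨p, hp⟩ := minWith_ex b u; rw [hp] at hmt; cases hmt
      injection h with h'
      injection h' with h1 h2
      subst h1; subst h2; subst ht
      refine ⟨by simp, by simp, by simp, ?_⟩
      intro x hx
      simp at hx
      subst hx
      exact le_refl _
    | some p =>
      rw [hmt] at h
      obtain ⟨m, i⟩ := p
      dsimp only at h
      obtain ⟨hi, hget, hlt, hle⟩ := ih m i hmt
      by_cases hab : a ≤ m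
      · rw [if_pos hab] at h
        injection h with h'
        injection h' with h1 h2
        subst h1; subst h2
        refine ⟨by simp, by simp, by simp, ?_⟩
        intro x hx
        rcases List.mem_cons.mp hx with rfl | hx
        · exact le_refl _
        · exact le_trans hab (hle x hx)
      · rw [if_neg hab] at h
        injection h with h'
        injection h' with h1 h2
        subst h1; subst h2
        push_neg at hab
        refine ⟨by simpa using hi, by simpa using hget, ?_, ?_⟩
        · intro x hx
          rw [List.take_succ_cons] at hx
          rcases List.mem_cons.mp hx with rfl | hx
          · exact hab
          · exact hlt x hx
        · intro x hx
          rcases List.mem_cons.mp hx with rfl | hx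
          · exact le_of_lt hab
          · exact hle x hx


lemma bLoop_eq_subB (cl : List Char) : ∀ (r start : Nat),
    bLoop cl cl.length r start = subB (cl.drop start) r := by
  intro r
  induction r with
  | zero => intro start; simp [bLoop, subB]
  | succ r ih =>
    intro start
    simp only [bLoop, subB]
    have hlen : (cl.drop start).length - r = cl.length - r - start := by
      simp [List.length_drop]
      omega
    rw [hlen]
    cases hm : minWith ((cl.drop start).take (cl.length - r - start)) with
    | none => rfl
    | some p =>
      obtain ⟨m, j⟩ := p
      dsimp only
      rw [ih (start + j + 1), List.drop_drop]
      rw [Nat.add_assoc]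


lemma main_eq : ∀ (k : Nat) (l : List Char), k ≤ l.length →
    ((runA (k : Int) (l.length : Int) [] l).reverse.take k) = subB l k := by
  intro k
  induction k with
  | zero => intro l _; simp [subB]
  | succ k ih =>
    intro l hk
    -- the first window, its leftmost minimum c at index j
    obtain ⟨c0, t0, hw⟩ : ∃ c0 t0, l.take (l.length - k) = c0 :: t0 := by
      cases hl : l.take (l.length - k) with
      | nil =>
        exfalso
        have := congrArg List.length hl
        simp [List.length_take] at this
        omega
      | cons a b => exact ⟨a, b, rfl⟩
    obtain ⟨⟨c, j⟩, hmin⟩ := minWith_ex c0 t0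
    rw [← hw] at hmin
    obtain ⟨hj, hget, hlt, hle⟩ := minWith_spec _ _ _ hmin
    have hjlen : j < l.length - k := lt_of_lt_of_le (by simpa [List.length_take] using hj) (by simp [List.length_take])
    have hgl : l[j]? = some c := by rw [List.getElem?_take_of_lt hjlen] at hget; exact hget
    have hu : l.take (j + 1) = l.take j ++ [c] := by
      rw [List.take_add_one, hgl]
      rfl
    have htj : l.take j = (l.take (l.length - k)).take j := by
      rw [List.take_take]
      congr 1
      omega
    have hlenu : (l.take (j + 1)).length = j + 1 := by
      rw [List.length_take]
      omega
    have hlenj : (l.take j).length = j := by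
      rw [List.length_take]
      omega
    have hvlen : (l.drop (j + 1)).length = l.length - (j + 1) := by simp
    -- step 1: split the run at position j+1
    have h1 : runA ((k + 1 : Nat) : Int) (l.length : Int) [] l
        = runA ((k + 1 : Nat) : Int) ((l.length : Int) - ((j + 1 : Nat) : Int))
            (runA ((k + 1 : Nat) : Int) (l.length : Int) [] (l.take (j + 1))) (l.drop (j + 1)) := by
      conv_lhs => rw [← List.take_append_drop (j + 1) l]
      rw [runA_append, hlenu, List.take_append_drop]
    -- step 2: the run over the first j+1 characters leaves exactly [c]
    have h2 : runA ((k + 1 : Nat) : Int) (l.length : Int) [] (l.take (j + 1)) = [c] := by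
      rw [hu, runA_append, hlenj]
      simp only [runA]
      rw [popA_all]
      · intro x hx
        rcases runA_sub _ _ _ _ x hx with h | h
        · simp at h
        · rw [htj] at h
          exact hlt x h
      · push_cast
        omega
    -- step 3: unpin the bottom element c
    have h3 : runA ((k + 1 : Nat) : Int) ((l.length : Int) - ((j + 1 : Nat) : Int)) [c] (l.drop (j + 1))
        = runA (((k + 1 : Nat) : Int) - 1) ((l.length : Int) - ((j + 1 : Nat) : Int)) [] (l.drop (j + 1)) ++ [c] := by
      have H : ∀ x ∈ (l.drop (j + 1)).take (((l.length : Int) - ((j + 1 : Nat) : Int) - ((k + 1 : Nat) : Int) + 1)).toNat, c ≤ x := by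
        intro x hx
        apply hle
        have hq : (((l.length : Int) - ((j + 1 : Nat) : Int) - ((k + 1 : Nat) : Int) + 1)).toNat
            = l.length - k - (j + 1) := by omega
        rw [hq, List.take_drop] at hx
        have hx2 : x ∈ l.take ((j + 1) + (l.length - k - (j + 1))) := List.mem_of_mem_drop hx
        exact List.take_subset_take_left l (by omega) hx2
      have := runA_pin ((k + 1 : Nat) : Int) c (l.drop (j + 1)) ((l.length : Int) - ((j + 1 : Nat) : Int)) [] H
      simpa using this
    have h4 : (((k + 1 : Nat) : Int) - 1) = ((k : Nat) : Int) := by push_cast; ring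
    have h5 : ((l.length : Int) - ((j + 1 : Nat) : Int)) = ((l.drop (j + 1)).length : Int) := by
      rw [hvlen]
      push_cast
      omega
    have IH := ih (l.drop (j + 1)) (by omega)
    -- assemble
    rw [h1, h2, h3, h4, h5]
    rw [List.reverse_append]
    simp only [List.reverse_cons, List.reverse_nil, List.nil_append, List.singleton_append,
      List.take_succ_cons]
    rw [IH]
    -- right-hand side
    conv_rhs => rw [subB]
    rw [hmin]


-- ===== VERDICT (by name: the statement is the Claim_ definition above) =====
theorem smallest_alphabetic_subsequence_spec : Claim_equal_smallest_alphabetic_subsequence := by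
  intro s k _ hpre
  unfold Spec_smallest_alphabetic_subsequence
  unfold Pre_smallest_alphabetic_subsequence at hpre
  simp only [smallest_alphabetic_subsequence, smallest_alphabetic_subsequence_alt]
  by_cases hk0 : 0 ≤ k
  case neg =>
    -- k < 0 and len(s) ≤ -k : both sides return some ""
    have hneg : (s.toList.length : Int) ≤ -k := by
      rcases hpre with h | h
      · exact absurd h hk0
      · exact h
    have hkn : ¬ ((s.toList.length : Int) < k) := by omega
    have hstlen := runA_len_le k s.toList (s.toList.length : Int) []
    rw [if_neg hkn, if_neg (by simp only [List.length_reverse]; push_cast; omega)]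
    have hm : k = -((((-k).toNat) : Nat) : Int) := by omega
    rw [hm, PySem.List.slice_to_neg_natCast _ _ (by omega)]
    have hnm : s.toList.length ≤ (-k).toNat := by omega
    have h0 : (runA (-((((-k).toNat) : Nat) : Int)) (s.toList.length : Int) [] s.toList).reverse.length
        - (-k).toNat = 0 := by
      have hle2 := runA_len_le (-((((-k).toNat) : Nat) : Int)) s.toList (s.toList.length : Int) []
      simp only [List.length_reverse, List.length_nil, Nat.zero_add] at hle2 ⊢
      omega
    rw [h0, List.take_zero]
    have ht0 : (-((((-k).toNat) : Nat) : Int)).toNat = 0 := by omega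
    rw [ht0]
    rfl
  have hpre := hk0
  by_cases hkn : ((s.toList.length : Int)) < k
  · rw [if_pos ?_, if_pos hkn]
    have hle := runA_len_le k s.toList (s.toList.length : Int) []
    simp only [List.length_reverse, List.length_nil, Nat.zero_add] at hle ⊢
    exact lt_of_le_of_lt (by exact_mod_cast hle) hkn
  · rw [if_neg hkn, if_neg ?_]
    · have hk' : k = ((k.toNat : Nat) : Int) := (Int.toNat_of_nonneg hpre).symm
      rw [hk', PySem.List.slice_to_natCast, bLoop_eq_subB, List.drop_zero]
      rw [main_eq k.toNat s.toList (by omega), Int.toNat_natCast]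
    · have hge := runA_len_ge k s.toList (s.toList.length : Int) [] (by simp only [List.length_nil]; push_cast; omega)
      simp only [List.length_reverse]
      omega
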